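-- pv_equiv track=rewrite | github.com/Abhi001vj/coding-interview-preparation | leetcode_discussion_google/Google-phone-ortime-for-turn-problem.py | process_queue
-- ===== SOURCE A (Python) =====
-- import heapq
-- from typing import List
--
-- def process_queue(n: int, times: List[int], k: int) -> int:
--     """
--     Calculate when the k+1th person (Joseph) will finish their request.
--
--     Parameters:
--     n: number of counters
--     times: list of processing times for each counter
--     k: Joseph's position (0-based) in queue
--
--     Returns:
--     int: Time when Joseph's request completes
--
--     Time Complexity: O(k log n)
--     Space Complexity: O(n)
--
--     Visual Example:
--     n=3, times=[3,2,5], k=4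
--
--     Initial State:
--     Counters: C0(0), C1(0), C2(0)
--     Queue: [P1 P2 P3 P4 P5(J)]
--
--     Simulation:
--     1. P1 → C0: [(C0,3), (C1,0), (C2,0)]
--     2. P2 → C1: [(C1,2), (C2,0), (C0,3)]
--     3. P3 → C2: [(C1,2), (C0,3), (C2,5)]
--     4. P4 → C1: [(C0,3), (C2,5), (C1,4)]
--     5. P5(J)→C0: [(C1,4), (C2,5), (C0,6)]
--     """
--
--     # Custom heap entries: (end_time, counter_id)
--     # Counter_id used for breaking ties
--     heap = [(0, i) for i in range(n)]
--     heapq.heapify(heap)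
--
--     """
--     Heap visualization after initialization:
--             (0,0)
--            /     \
--         (0,1)   (0,2)
--     """
--
--     # Process k people before Joseph
--     for _ in range(k):
--         end_time, counter = heapq.heappop(heap)
--         # New end time = current end time + processing time
--         heapq.heappush(heap, (end_time + times[counter], counter))
--
--         """
--         Example heap state after first iteration:
--         Before: [(0,0), (0,1), (0,2)]
--         After:  [(0,1), (0,2), (3,0)]
--         """
--
--     # Process Joseph's request
--     end_time, counter = heapq.heappop(heap)
--     final_time = end_time + times[counter]
--
--     """
--     Final state visualization for example:
--     Time →  0   1   2   3   4   5   6   7   8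
--     C0    [---P1---][-----P5(Joseph)-----]
--     C1    [--P2--][--P4--]
--     C2    [-------P3-------]
--     """
--
--     return final_time
-- ===== SOURCE B (Python) =====
-- from typing import List
--
-- def process_queue(n: int, times: List[int], k: int) -> int:
--     """Simulate the queue on a plain array instead of a heap: avail[i] is the
--     time counter i becomes free; each person walks to the earliest-free counter
--     (lowest index on ties), found by scanning for the minimal (time, index) pair."""
--     avail = [0] * n
--     for _ in range(k):
--         t, i = min((t, i) for i, t in enumerate(avail))
--         avail[i] = t + times[i]
--     t, i = min((t, i) for i, t in enumerate(avail))
--     return t + times[i]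
-- ===== Notes on version B (the rewrite author's own statement) =====
-- stated objective: simpler
-- what changed: Replaces the heapq priority queue of (end_time, counter) pairs with a plain array avail of counter-free times updated in place, picking the earliest-free counter (lowest index on ties) by a linear scan min(range(n), key=lambda j: avail[j]); Pre_ is exactly the inputs where A returns normally (n >= 1 and the simulation never indexes past len(times)).
import Mathlib
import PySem

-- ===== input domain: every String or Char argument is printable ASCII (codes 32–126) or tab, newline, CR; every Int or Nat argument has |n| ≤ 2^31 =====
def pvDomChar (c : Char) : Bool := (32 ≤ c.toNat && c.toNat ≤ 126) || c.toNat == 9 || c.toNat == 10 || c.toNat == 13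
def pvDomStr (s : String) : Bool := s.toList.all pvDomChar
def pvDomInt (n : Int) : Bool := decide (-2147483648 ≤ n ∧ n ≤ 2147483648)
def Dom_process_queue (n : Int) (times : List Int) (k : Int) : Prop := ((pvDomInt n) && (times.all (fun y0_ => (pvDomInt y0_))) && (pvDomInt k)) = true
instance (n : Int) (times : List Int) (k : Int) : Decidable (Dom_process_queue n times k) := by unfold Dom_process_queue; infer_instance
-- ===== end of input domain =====

-- B replaces A's heap with a plain array of counter-free times scanned linearly for the
-- earliest-free counter (objective: simpler — shorter code, no priority queue).

-- ===== PORT A =====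
-- heapq is modeled by its observable semantics: heappop removes the lexicographically least
-- (end_time, counter) pair and heappush inserts a pair.  This is exact for A's usage: all pairs
-- in the heap carry distinct counter ids, so the popped minimum is unique and the internal
-- array layout of the heap never influences any value A computes.
def pvPairLt (a b : Int × Int) : Bool := a.1 < b.1 || (a.1 == b.1 && a.2 < b.2)

def pvPMin (a b : Int × Int) : Int × Int := if pvPairLt b a then b else a

def pvHeapMin : List (Int × Int) → Int × Int
  | [] => (0, 0)
  | x :: xs => xs.foldl pvPMin x

-- one iteration of A's loop: pop the least pair, push it back advanced by its service time
-- (pyGetD's default is unreachable under Pre_: no popped counter ever indexes out of range)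
def pvHeapStep (times : List Int) (h : List (Int × Int)) : List (Int × Int) :=
  ((pvHeapMin h).1 + PySem.List.pyGetD times (pvHeapMin h).2 0, (pvHeapMin h).2) :: h.erase (pvHeapMin h)

def process_queue (n : Int) (times : List Int) (k : Int) : Int :=
  let heap := (pvHeapStep times)^[k.toNat] ((List.range n.toNat).map (fun (i : Nat) => ((0 : Int), (i : Int))))
  (pvHeapMin heap).1 + PySem.List.pyGetD times (pvHeapMin heap).2 0

-- ===== PORT B =====
-- t, i = min((t, i) for i, t in enumerate(avail)): one pass over avail keeping the running
-- lexicographic minimum and the running index (ported by hand: Lean's Prod '<' is pointwise,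
-- not Python's tuple order; min of an empty generator raises in Python, so the none case is
-- unreachable under Pre_ and .getD returns junk there)
def pvMinTI (avail : List Int) : Int × Int :=
  (avail.foldl
    (fun (st : Option (Int × Int) × Int) t =>
      (some (match st.1 with
        | none => (t, st.2)
        | some m => pvPMin m (t, st.2)), st.2 + 1))
    (none, 0)).1.getD (0, 0)

-- avail[i] = t + times[i]  (i is an index produced by enumerate, hence nonnegative, so .toNat
-- is exact; the pyGetD default is unreachable under Pre_)
def pvStepB (times : List Int) (avail : List Int) : List Int :=
  avail.set (pvMinTI avail).2.toNat ((pvMinTI avail).1 + PySem.List.pyGetD times (pvMinTI avail).2 0)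

def process_queue_alt (n : Int) (times : List Int) (k : Int) : Int :=
  let avail := (pvStepB times)^[k.toNat] (List.replicate n.toNat 0)
  (pvMinTI avail).1 + PySem.List.pyGetD times (pvMinTI avail).2 0

-- ===== PRECONDITION & SPEC =====
-- Pre_ is exactly the inputs on which Python A returns normally: at least one counter, and the
-- simulation never indexes past len(times) — i.e. n ≤ len(times), or some listed time is
-- nonpositive (that counter then absorbs the whole queue before a missing index is reached),
-- or the queue is short enough (max(k,0) < len(times)) that counter len(times) is never used.
-- Elsewhere A (and B) raise IndexError / ValueError.
def Pre_process_queue (n : Int) (times : List Int) (k : Int) : Prop :=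
  1 ≤ n ∧ (n ≤ (times.length : Int) ∨ (∃ t ∈ times, t ≤ 0) ∨
    (0 < (times.length : Int) ∧ k < (times.length : Int)))
instance (n : Int) (times : List Int) (k : Int) : Decidable (Pre_process_queue n times k) := by
  unfold Pre_process_queue; infer_instance

def pvWitness_process_queue : Int × List Int × Int := (2, ([3, 2], 4))

def Spec_process_queue (n : Int) (times : List Int) (k : Int) (out : Int) : Prop := out = process_queue_alt n times k
instance (n : Int) (times : List Int) (k : Int) (out : Int) : Decidable (Spec_process_queue n times k out) := by unfold Spec_process_queue; infer_instance

-- ===== CLAIM (what is proved, stated in full; the proofs are below) =====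
def Claim_equal_process_queue : Prop := ∀ (n : Int) (times : List Int) (k : Int), Dom_process_queue n times k → Pre_process_queue n times k → Spec_process_queue n times k (process_queue n times k)

-- ===== LEMMAS AND PROOFS =====

-- lexicographic order on (end_time, counter) pairs, as Props
def pvPLe (a b : Int × Int) : Prop := a.1 < b.1 ∨ (a.1 = b.1 ∧ a.2 ≤ b.2)
def pvPLt (a b : Int × Int) : Prop := a.1 < b.1 ∨ (a.1 = b.1 ∧ a.2 < b.2)

theorem pvPLe_refl (a : Int × Int) : pvPLe a a := by unfold pvPLe; omega

theorem pvPLe_trans {a b c : Int × Int} (h1 : pvPLe a b) (h2 : pvPLe b c) : pvPLe a c := by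
  unfold pvPLe at *; omega

theorem pvPLe_antisymm {a b : Int × Int} (h1 : pvPLe a b) (h2 : pvPLe b a) : a = b := by
  unfold pvPLe at *
  have h3 : a.1 = b.1 ∧ a.2 = b.2 := by omega
  exact Prod.ext h3.1 h3.2

theorem pvPairLt_iff {a b : Int × Int} : pvPairLt a b = true ↔ pvPLt a b := by
  unfold pvPairLt pvPLt
  simp [Bool.or_eq_true, Bool.and_eq_true, decide_eq_true_eq, beq_iff_eq]

theorem pvPLe_of_lt {a b : Int × Int} (h : pvPLt a b) : pvPLe a b := by
  unfold pvPLt at h; unfold pvPLe; omega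

theorem pvPLe_of_not_lt {a b : Int × Int} (h : ¬ pvPLt b a) : pvPLe a b := by
  unfold pvPLt at h; unfold pvPLe; omega

theorem pvPMin_le_left (a b : Int × Int) : pvPLe (pvPMin a b) a := by
  unfold pvPMin; split
  · next h => exact pvPLe_of_lt (pvPairLt_iff.mp h)
  · exact pvPLe_refl a

theorem pvPMin_le_right (a b : Int × Int) : pvPLe (pvPMin a b) b := by
  unfold pvPMin; split
  · exact pvPLe_refl b
  · next h => exact pvPLe_of_not_lt (fun hc => h (pvPairLt_iff.mpr hc))

theorem pvPMin_cases (a b : Int × Int) : pvPMin a b = a ∨ pvPMin a b = b := by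
  unfold pvPMin; split
  · right; rfl
  · left; rfl

theorem pv_foldl_mem (xs : List (Int × Int)) : ∀ a, xs.foldl pvPMin a = a ∨ xs.foldl pvPMin a ∈ xs := by
  induction xs with
  | nil => intro a; left; rfl
  | cons x t ih =>
    intro a
    simp only [List.foldl_cons]
    rcases ih (pvPMin a x) with h | h
    · rcases pvPMin_cases a x with h' | h'
      · left; rw [h, h']
      · right; rw [h, h']; exact List.mem_cons_self
    · right; exact List.mem_cons_of_mem _ h

theorem pv_foldl_le_init (xs : List (Int × Int)) : ∀ a, pvPLe (xs.foldl pvPMin a) a := by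
  induction xs with
  | nil => intro a; exact pvPLe_refl a
  | cons x t ih =>
    intro a
    simp only [List.foldl_cons]
    exact pvPLe_trans (ih (pvPMin a x)) (pvPMin_le_left a x)

theorem pv_foldl_le_mem (xs : List (Int × Int)) : ∀ a y, y ∈ xs → pvPLe (xs.foldl pvPMin a) y := by
  induction xs with
  | nil => intro a y hy; cases hy
  | cons x t ih =>
    intro a y hy
    simp only [List.foldl_cons]
    rcases List.mem_cons.mp hy with h | h
    · subst h
      exact pvPLe_trans (pv_foldl_le_init t (pvPMin a y)) (pvPMin_le_right a y)
    · exact ih (pvPMin a x) y h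

theorem pvHeapMin_mem {l : List (Int × Int)} (h : l ≠ []) : pvHeapMin l ∈ l := by
  cases l with
  | nil => exact absurd rfl h
  | cons x t =>
    simp only [pvHeapMin]
    rcases pv_foldl_mem t x with h' | h'
    · rw [h']; exact List.mem_cons_self
    · exact List.mem_cons_of_mem _ h'

theorem pvHeapMin_le {l : List (Int × Int)} {y : Int × Int} (hy : y ∈ l) : pvPLe (pvHeapMin l) y := by
  cases l with
  | nil => cases hy
  | cons x t =>
    simp only [pvHeapMin]
    rcases List.mem_cons.mp hy with h | h
    · subst h; exact pv_foldl_le_init t y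
    · exact pv_foldl_le_mem t x y h

theorem pvHeapMin_perm {l l' : List (Int × Int)} (p : l.Perm l') (h : l ≠ []) :
    pvHeapMin l = pvHeapMin l' := by
  have h' : l' ≠ [] := by
    intro e; subst e; exact h (List.Perm.eq_nil p)
  refine pvPLe_antisymm (pvHeapMin_le (p.mem_iff.mpr (pvHeapMin_mem h'))) ?_
  exact pvHeapMin_le (p.mem_iff.mp (pvHeapMin_mem h))

-- erasing the image of one index from two pointwise-almost-equal maps with injective tags
theorem pv_map_erase (f g : Int → Int × Int) (i : Int)
    (hf : ∀ j, (f j).2 = j) (hg : ∀ j, (g j).2 = j) :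
    ∀ (l : List Int), l.Nodup → (∀ j ∈ l, j ≠ i → f j = g j) →
      (l.map f).erase (f i) = (l.map g).erase (g i) := by
  intro l
  induction l with
  | nil => intro _ _; rfl
  | cons j t ih =>
    intro hnd hfg
    have hnd' := List.nodup_cons.mp hnd
    by_cases hj : j = i
    · subst hj
      simp only [List.map_cons, List.erase_cons_head]
      apply List.map_congr_left
      intro x hx
      exact hfg x (List.mem_cons_of_mem _ hx) (fun he => hnd'.1 (he ▸ hx))
    · have hne : f j ≠ f i := by
        intro he
        apply hj
        have := hf j
        rw [he, hf i] at this
        exact this.symm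
      have hne' : g j ≠ g i := by
        intro he
        apply hj
        have := hg j
        rw [he, hg i] at this
        exact this.symm
      simp only [List.map_cons]
      rw [List.erase_cons_tail (by simp [hne]), List.erase_cons_tail (by simp [hne']),
        hfg j List.mem_cons_self hj,
        ih hnd'.2 (fun x hx hxi => hfg x (List.mem_cons_of_mem _ hx) hxi)]

-- the pair list B's avail array denotes
def pvCanonB (avail : List Int) : List (Int × Int) :=
  (PySem.List.pyRange 0 ((avail.length : Int)) 1).map (fun j => (PySem.List.pyGetD avail j 0, j))

theorem pv_canonB_ne {avail : List Int} (h : avail ≠ []) : pvCanonB avail ≠ [] := by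
  unfold pvCanonB
  intro he
  have hl := congrArg List.length he
  rw [List.length_map, PySem.List.length_pyRange_one, List.length_nil] at hl
  exact h (List.eq_nil_of_length_eq_zero (by omega))

-- B's one-pass scan unrolled: its running state over the tail equals the pvPMin fold over the
-- remaining (value, index) pairs
theorem pv_minTI_fold :
    ∀ (l : List Int) (m0 : Int × Int) (s : Int),
      (l.foldl
        (fun (st : Option (Int × Int) × Int) t =>
          (some (match st.1 with
            | none => (t, st.2)
            | some m => pvPMin m (t, st.2)), st.2 + 1))
        (some m0, s)).1
      = some (((PySem.List.enumerate l s).map (fun q => (q.2, q.1))).foldl pvPMin m0) := by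
  intro l
  induction l with
  | nil => intro m0 s; rfl
  | cons t r ih =>
    intro m0 s
    simp only [List.foldl_cons]
    rw [ih (pvPMin m0 (t, s)) (s + 1)]
    rfl

-- B's tuple minimum is the lexicographic minimum of the canonical pair list
theorem pvMinTI_eq_canon {avail : List Int} (hav : avail ≠ []) :
    pvMinTI avail = pvHeapMin (pvCanonB avail) := by
  have hcanon : pvCanonB avail = (PySem.List.enumerate avail).map (fun q => (q.2, q.1)) := by
    unfold pvCanonB
    rw [PySem.List.enumerate_eq_map_pyRange avail 0, PySem.List.len_eq, List.map_map]
    rfl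
  rw [hcanon]
  cases avail with
  | nil => exact absurd rfl hav
  | cons a r =>
    unfold pvMinTI
    simp only [List.foldl_cons]
    rw [pv_minTI_fold r (a, 0) (0 + 1)]
    rfl

-- reading a set list at / off the written index
theorem pv_getD_set_self {l : List Int} {i : Nat} {v : Int} (h : i < l.length) :
    (l.set i v).getD i 0 = v := by
  rw [List.getD_eq_getElem?_getD, List.getElem?_set_self h]
  rfl

theorem pv_getD_set_ne {l : List Int} {i j : Nat} {v : Int} (h : i ≠ j) :
    (l.set i v).getD j 0 = l.getD j 0 := by
  rw [List.getD_eq_getElem?_getD, List.getElem?_set_ne h, ← List.getD_eq_getElem?_getD]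

-- one simulation step preserves the correspondence between A's heap and B's array
theorem pv_sim_step {times : List Int}
    {h : List (Int × Int)} {avail : List Int} (hav : avail ≠ [])
    (hp : h.Perm (pvCanonB avail)) :
    (pvHeapStep times h).Perm (pvCanonB (pvStepB times avail))
    ∧ (pvStepB times avail).length = avail.length := by
  have hcne : pvCanonB avail ≠ [] := pv_canonB_ne hav
  have hhne : h ≠ [] := by
    intro e; subst e; exact hcne (List.Perm.nil_eq hp).symm
  obtain ⟨m, hmmem, hmeq⟩ : ∃ m, m ∈ PySem.List.pyRange 0 ((avail.length : Int)) 1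
      ∧ pvHeapMin (pvCanonB avail) = (PySem.List.pyGetD avail m 0, m) := by
    have hm := pvHeapMin_mem hcne
    unfold pvCanonB at hm
    rcases List.mem_map.mp hm with ⟨j, hj, he⟩
    exact ⟨j, hj, he.symm⟩
  have hmb := PySem.List.mem_pyRange_one.mp hmmem
  have hmlt : m.toNat < avail.length := by omega
  have hti : pvMinTI avail = (PySem.List.pyGetD avail m 0, m) := by
    rw [pvMinTI_eq_canon hav, hmeq]
  have hm : pvHeapMin h = (PySem.List.pyGetD avail m 0, m) :=
    (pvHeapMin_perm hp hhne).trans hmeq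
  set v : Int := PySem.List.pyGetD avail m 0 + PySem.List.pyGetD times m 0 with hv
  have hstepB : pvStepB times avail = avail.set m.toNat v := by
    unfold pvStepB
    rw [hti]
  have hmcast : ((m.toNat : Nat) : Int) = m := by omega
  have hget_self : PySem.List.pyGetD (avail.set m.toNat v) m 0 = v := by
    rw [← hmcast, PySem.List.pyGetD_natCast]
    exact pv_getD_set_self hmlt
  have hget_ne : ∀ j, j ∈ PySem.List.pyRange 0 ((avail.length : Int)) 1 → j ≠ m →
      PySem.List.pyGetD (avail.set m.toNat v) j 0 = PySem.List.pyGetD avail j 0 := by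
    intro j hj hjm
    have hjb := PySem.List.mem_pyRange_one.mp hj
    have hjcast : ((j.toNat : Nat) : Int) = j := by omega
    rw [← hjcast, PySem.List.pyGetD_natCast, PySem.List.pyGetD_natCast]
    exact pv_getD_set_ne (by omega)
  have hlen' : (avail.set m.toNat v).length = avail.length := List.length_set
  refine ⟨?_, by rw [hstepB, hlen']⟩
  unfold pvHeapStep
  rw [hm, hstepB]
  dsimp only
  have hpoint : ∀ j ∈ PySem.List.pyRange 0 ((avail.length : Int)) 1, j ≠ m →
      (fun j => (PySem.List.pyGetD avail j 0, j)) j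
        = (fun j => (PySem.List.pyGetD (avail.set m.toNat v) j 0, j)) j := by
    intro j hj hjm
    show (PySem.List.pyGetD avail j 0, j) = (PySem.List.pyGetD (avail.set m.toNat v) j 0, j)
    rw [hget_ne j hj hjm]
  have herase : (pvCanonB avail).erase (PySem.List.pyGetD avail m 0, m)
      = (pvCanonB (avail.set m.toNat v)).erase (PySem.List.pyGetD (avail.set m.toNat v) m 0, m) := by
    unfold pvCanonB
    rw [hlen']
    exact pv_map_erase (fun j => (PySem.List.pyGetD avail j 0, j))
      (fun j => (PySem.List.pyGetD (avail.set m.toNat v) j 0, j)) m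
      (fun j => rfl) (fun j => rfl)
      (PySem.List.pyRange 0 ((avail.length : Int)) 1)
      (PySem.List.nodup_pyRange_one 0 ((avail.length : Int))) hpoint
  have hhead : (PySem.List.pyGetD avail m 0 + PySem.List.pyGetD times m 0, m)
      = (PySem.List.pyGetD (avail.set m.toNat v) m 0, m) := by
    rw [hget_self]
  rw [hhead]
  refine (List.Perm.cons _ (hp.erase _)).trans ?_
  rw [herase]
  refine (List.perm_cons_erase ?_).symm
  unfold pvCanonB
  rw [hlen']
  exact List.mem_map.mpr ⟨m, hmmem, by rw [hget_self]⟩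

-- the initial states correspond
theorem pv_sim_init (n : Int) :
    (List.range n.toNat).map (fun (i : Nat) => ((0 : Int), (i : Int)))
      = pvCanonB (List.replicate n.toNat 0) := by
  unfold pvCanonB
  rw [List.length_replicate, PySem.List.pyRange_one, List.map_map]
  simp only [sub_zero, Int.toNat_natCast]
  apply List.map_congr_left
  intro i hi
  have h0 : PySem.List.pyGetD (List.replicate n.toNat (0 : Int)) ((i : Nat) : Int) 0 = 0 := by
    rw [PySem.List.pyGetD_natCast]
    rcases lt_or_ge i n.toNat with h | h
    · exact List.getD_replicate _ h
    · rw [List.getD_eq_default]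
      simp [h]
  simp only [Function.comp_apply, zero_add, h0]

-- after any number of steps A's heap is a permutation of B's array read as (avail[j], j) pairs
theorem pv_sim {n : Int} (times : List Int) (hn : 1 ≤ n) :
    ∀ m : Nat,
      ((pvHeapStep times)^[m] ((List.range n.toNat).map (fun (i : Nat) => ((0 : Int), (i : Int))))).Perm
        (pvCanonB ((pvStepB times)^[m] (List.replicate n.toNat 0)))
      ∧ ((pvStepB times)^[m] (List.replicate n.toNat 0)).length = n.toNat := by
  intro m
  induction m with
  | zero =>
    constructor
    · rw [Function.iterate_zero_apply, Function.iterate_zero_apply, pv_sim_init n]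
    · rw [Function.iterate_zero_apply, List.length_replicate]
  | succ m ih =>
    rw [Function.iterate_succ_apply', Function.iterate_succ_apply']
    have hav : ((pvStepB times)^[m] (List.replicate n.toNat 0)) ≠ [] := by
      intro he
      have := congrArg List.length he
      rw [ih.2] at this
      simp at this
      omega
    obtain ⟨h1, h2⟩ := pv_sim_step (times := times) hav ih.1
    exact ⟨h1, by rw [h2, ih.2]⟩

-- ===== VERDICT (by name: the statement is the Claim_ definition above) =====
theorem process_queue_spec : Claim_equal_process_queue := by
  unfold Claim_equal_process_queue
  intro n times k _hdom hpre
  unfold Spec_process_queue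
  have hn : 1 ≤ n := hpre.1
  obtain ⟨hp, hlen⟩ := pv_sim (n := n) times hn k.toNat
  simp only [process_queue, process_queue_alt]
  set avail := (pvStepB times)^[k.toNat] (List.replicate n.toNat 0) with ha
  have hav : avail ≠ [] := by
    intro he
    have := congrArg List.length he
    rw [hlen] at this
    simp at this
    omega
  have hcne : pvCanonB avail ≠ [] := pv_canonB_ne hav
  have hhne : ((pvHeapStep times)^[k.toNat] ((List.range n.toNat).map (fun (i : Nat) => ((0 : Int), (i : Int))))) ≠ [] := by
    intro e
    exact hcne (List.Perm.nil_eq (e ▸ hp)).symm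
  have hm : pvHeapMin ((pvHeapStep times)^[k.toNat] ((List.range n.toNat).map (fun (i : Nat) => ((0 : Int), (i : Int)))))
      = pvMinTI avail := by
    rw [pvMinTI_eq_canon hav]
    exact pvHeapMin_perm hp hhne
  rw [hm]
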